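-- pv_equiv track=rewrite | github.com/namanpy/RecommendationSystem | Model/model.py | ParseGenre
-- ===== SOURCE A (Python) =====
-- genresHashmap = {
--   "Action" : 1,
--   "Adventure" : 2,
--   "Animation" : 3,
--   "Children" : 4,
--   "Comedy" : 5,
--   "Crime" : 6,
--   "Documentary" : 7,
--   "Drama" : 8,
--   "Fantasy" : 9,
--   "Film-Noir" : 10,
--   "Horror" : 11,
--   "Musical" : 12,
--   "Mystery" : 13,
--   "Romance" : 14,
--   "Sci-Fi"  : 15,
--   "Thriller" : 16,
--   "War" : 17,
--   "Western" : 18,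
--   "IMAX" : 19,
--   "(no genres listed)" : 20
-- }
--
-- def ParseGenre(genreString):
--   genres = genreString.split("|")
--   binaryGenres = []
--   for key in genresHashmap.keys():
--     if(key in genres):
--       binaryGenres.append(1)
--     else:
--       binaryGenres.append(0)
--   return binaryGenres
-- ===== SOURCE B (Python) =====
-- genreNames = ("Action|Adventure|Animation|Children|Comedy|Crime|Documentary|Drama|Fantasy|"
--               "Film-Noir|Horror|Musical|Mystery|Romance|Sci-Fi|Thriller|War|Western|IMAX|"
--               "(no genres listed)").split("|")
--
-- def ParseGenre(genreString):
--     result = [0] * len(genreNames)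
--     for g in genreString.split("|"):
--         try:
--             result[genreNames.index(g)] = 1
--         except ValueError:
--             pass
--     return result
-- ===== Notes on version B (the rewrite author's own statement) =====
-- stated objective: idiomatic
-- what changed: B iterates over the input's genres (not the 20 dict keys) and marks result[i]=1 at the position of each genre in an ordered name list built from one joined string, skipping unknown genres; A scans all 20 dict keys appending a membership-test result per key.
import Mathlib
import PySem

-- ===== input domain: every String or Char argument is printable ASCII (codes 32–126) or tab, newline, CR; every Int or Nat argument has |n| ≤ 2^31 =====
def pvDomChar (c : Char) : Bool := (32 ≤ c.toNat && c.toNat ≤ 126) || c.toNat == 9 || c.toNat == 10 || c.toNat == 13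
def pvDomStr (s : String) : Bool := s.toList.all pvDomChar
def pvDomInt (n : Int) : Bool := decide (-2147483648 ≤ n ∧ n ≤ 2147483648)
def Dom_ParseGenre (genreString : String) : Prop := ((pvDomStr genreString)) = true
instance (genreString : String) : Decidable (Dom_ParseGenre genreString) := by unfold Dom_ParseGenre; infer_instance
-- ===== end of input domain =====

-- B iterates the INPUT's genres and marks the position of each known genre in an ordered
-- name list, instead of A's scan over all 20 dict keys with a membership test per key (idiomatic).

-- ===== PORT A =====
-- module constant of A: the genre dictionary
def genresHashmap : PySem.Dict String Int := PySem.Dict.ofList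
  [("Action", 1), ("Adventure", 2), ("Animation", 3), ("Children", 4), ("Comedy", 5),
   ("Crime", 6), ("Documentary", 7), ("Drama", 8), ("Fantasy", 9), ("Film-Noir", 10),
   ("Horror", 11), ("Musical", 12), ("Mystery", 13), ("Romance", 14), ("Sci-Fi", 15),
   ("Thriller", 16), ("War", 17), ("Western", 18), ("IMAX", 19), ("(no genres listed)", 20)]

-- `.getD []` only unpacks the `some` that split? always returns for the nonempty separator "|"
def ParseGenre (genreString : String) : List Int :=
  let genres := (PySem.Str.split? genreString "|").getD []
  let binaryGenres : List Int := []
  genresHashmap.keys.foldl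
    (fun binaryGenres key =>
      if genres.contains key then binaryGenres ++ [1] else binaryGenres ++ [0])
    binaryGenres

-- ===== PORT B =====
-- module constant of B: the ordered genre-name list, split out of one joined string
def genreNames : List String :=
  (PySem.Str.split? "Action|Adventure|Animation|Children|Comedy|Crime|Documentary|Drama|Fantasy|Film-Noir|Horror|Musical|Mystery|Romance|Sci-Fi|Thriller|War|Western|IMAX|(no genres listed)" "|").getD []

-- B's loop body: `try: result[genreNames.index(g)] = 1 except ValueError: pass`
-- (index? = none is exactly the ValueError case, which the Python swallows)
def pvStepB (result : List Int) (g : String) : List Int :=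
  match PySem.List.index? genreNames g with
  | some i => result.set i 1
  | none => result

def ParseGenre_alt (genreString : String) : List Int :=
  let result : List Int := List.replicate genreNames.length 0
  ((PySem.Str.split? genreString "|").getD []).foldl pvStepB result

-- ===== PRECONDITION & SPEC =====
def Spec_ParseGenre (genreString : String) (out : List Int) : Prop := out = ParseGenre_alt genreString
instance (genreString : String) (out : List Int) : Decidable (Spec_ParseGenre genreString out) := by unfold Spec_ParseGenre; infer_instance

-- ===== CLAIM (what is proved, stated in full; the proofs are below) =====
def Claim_equal_ParseGenre : Prop := ∀ (genreString : String), Dom_ParseGenre genreString → Spec_ParseGenre genreString (ParseGenre genreString)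

-- ===== LEMMAS AND PROOFS =====

-- the key list, in dict order, and its j-th key
def gKeys : List String :=
  ["Action", "Adventure", "Animation", "Children", "Comedy", "Crime", "Documentary",
   "Drama", "Fantasy", "Film-Noir", "Horror", "Musical", "Mystery", "Romance", "Sci-Fi",
   "Thriller", "War", "Western", "IMAX", "(no genres listed)"]

def gkey (j : Nat) : String := gKeys.getD j ""

set_option maxHeartbeats 2000000 in
theorem gm_keys : genresHashmap.keys = gKeys := by decide

set_option maxHeartbeats 4000000 in
set_option maxRecDepth 100000 in
theorem gNames_eq : genreNames = gKeys := by decide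

set_option maxHeartbeats 2000000 in
set_option maxRecDepth 100000 in
theorem index?_gkey_all : ∀ j ∈ List.range 20, PySem.List.index? gKeys (gkey j) = some j := by
  decide

theorem index?_gkey (j : Nat) (hj : j < 20) :
    PySem.List.index? gKeys (gkey j) = some j :=
  index?_gkey_all j (List.mem_range.mpr hj)

theorem index?_bound (g : String) (i : Nat) (h : PySem.List.index? gKeys g = some i) :
    i < 20 ∧ gkey i = g := by
  obtain ⟨hk, hg, -⟩ := PySem.List.getElem_of_index?_eq_some h
  have h20 : gKeys.length = 20 := by decide
  refine ⟨h20 ▸ hk, ?_⟩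
  unfold gkey
  rw [List.getD_eq_getElem?_getD, List.getElem?_eq_getElem hk, hg]
  rfl

theorem any_eq_contains (gs : List String) (j : Nat) (hj : j < 20) :
    gs.any (fun g => PySem.List.index? gKeys g == some j) = gs.contains (gkey j) := by
  by_cases hc : gs.contains (gkey j) = true
  · rw [hc, List.any_eq_true]
    exact ⟨gkey j, List.contains_iff_mem.mp hc,
      by simp only [index?_gkey j hj, beq_self_eq_true]⟩
  · rw [Bool.not_eq_true] at hc
    rw [hc, List.any_eq_false]
    intro g hg hb
    rw [beq_iff_eq] at hb
    obtain ⟨-, hk⟩ := index?_bound g j hb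
    apply absurd hc
    simp only [Bool.not_eq_false]
    rw [List.contains_iff_mem]
    exact hk ▸ hg

theorem pvStepB_length (gs : List String) (acc : List Int) :
    (gs.foldl pvStepB acc).length = acc.length := by
  induction gs generalizing acc with
  | nil => rfl
  | cons g t ih =>
    rw [List.foldl_cons, ih]
    unfold pvStepB
    rw [gNames_eq]
    cases PySem.List.index? gKeys g <;> simp

theorem foldl_set_getElem? (gs : List String) (acc : List Int) (hacc : acc.length = 20)
    (j : Nat) (hj : j < 20) :
    (gs.foldl pvStepB acc)[j]? =
      if gs.any (fun g => PySem.List.index? gKeys g == some j) then some 1 else acc[j]? := by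
  induction gs generalizing acc with
  | nil => simp
  | cons g gs ih =>
    rw [List.foldl_cons, List.any_cons]
    have hstep0 : pvStepB acc g = match PySem.List.index? gKeys g with
        | some i => acc.set i 1
        | none => acc := by unfold pvStepB; rw [gNames_eq]
    cases h : PySem.List.index? gKeys g with
    | none =>
      have hstep : pvStepB acc g = acc := by rw [hstep0, h]
      rw [hstep, ih acc hacc]
      simp
    | some i =>
      obtain ⟨hi, -⟩ := index?_bound g i h
      have hstep : pvStepB acc g = acc.set i 1 := by rw [hstep0, h]
      rw [hstep, ih (acc.set i 1) (by simp [hacc])]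
      by_cases hji : i = j
      · subst hji
        have hset : (acc.set i 1)[i]? = some 1 := List.getElem?_set_self (by omega)
        have hb : ((some i : Option Nat) == some i) = true := by simp
        rw [hb, Bool.true_or, if_pos rfl]
        split_ifs with hany
        · rfl
        · exact hset
      · have hb : ((some i : Option Nat) == some j) = false := by simp [hji]
        rw [hb, Bool.false_or]
        split_ifs with hany
        · rfl
        · exact List.getElem?_set_ne (by omega)

-- A's loop is a map over the keys
theorem parseGenre_eq_map (genreString : String) :
    ParseGenre genreString =
      gKeys.map (fun k => if ((PySem.Str.split? genreString "|").getD []).contains k then (1 : Int) else 0) := by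
  unfold ParseGenre
  rw [gm_keys]
  have h : ∀ (l : List String) (a : List Int),
      l.foldl (fun acc key => if ((PySem.Str.split? genreString "|").getD []).contains key
        then acc ++ [(1:Int)] else acc ++ [0]) a =
      a ++ l.map (fun key => if ((PySem.Str.split? genreString "|").getD []).contains key
        then (1:Int) else 0) := by
    intro l
    induction l with
    | nil => simp
    | cons k ks ih =>
      intro a
      rw [List.foldl_cons, List.map_cons]
      by_cases hk : ((PySem.Str.split? genreString "|").getD []).contains k = true
      · rw [if_pos hk, ih, if_pos hk]
        simp
      · rw [if_neg hk, ih, if_neg hk]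
        simp
  simpa using h gKeys []

theorem gKeys_getElem? (j : Nat) (hj : j < 20) : gKeys[j]? = some (gkey j) := by
  interval_cases j <;> rfl

-- ===== VERDICT (by name: the statement is the Claim_ definition above) =====
theorem ParseGenre_spec : Claim_equal_ParseGenre := by
  intro genreString _
  unfold Spec_ParseGenre
  set gs := (PySem.Str.split? genreString "|").getD [] with hgs
  rw [parseGenre_eq_map]
  unfold ParseGenre_alt
  rw [← hgs]
  have hlen : (List.replicate genreNames.length (0:Int)).length = 20 := by
    rw [gNames_eq]; decide
  apply List.ext_getElem?
  intro j
  by_cases hj : j < 20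
  · rw [foldl_set_getElem? gs (List.replicate genreNames.length 0) hlen j hj,
        any_eq_contains gs j hj]
    rw [List.getElem?_map, gKeys_getElem? j hj]
    by_cases hc : gs.contains (gkey j) = true
    · rw [hc]
      simp [List.contains_iff_mem.mp hc]
    · rw [Bool.not_eq_true] at hc
      have hm : gkey j ∉ gs := fun hmem => by
        rw [List.contains_iff_mem.mpr hmem] at hc; simp at hc
      rw [hc, List.getElem?_replicate]
      have hj' : j < (List.replicate genreNames.length (0:Int)).length := by omega
      simp only [List.length_replicate] at hj'
      simp [hm, hj']
  · have h1 : (gKeys.map (fun k => if gs.contains k then (1:Int) else 0))[j]? = none := by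
      rw [List.getElem?_eq_none_iff]; simp [gKeys]; omega
    have h2 : (gs.foldl pvStepB (List.replicate genreNames.length 0))[j]? = none := by
      rw [List.getElem?_eq_none_iff, pvStepB_length]
      simp only [List.length_replicate]
      rw [gNames_eq]; simp [gKeys]; omega
    rw [h1, h2]
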